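-- pv_equiv track=rewrite | github.com/linhdvu14/cp-sols | sols/CodeForces/1682_d2/D_Circular_Spanning_Tree.py | solve
-- ===== SOURCE A (Python) =====
-- def solve(N, S):
--     odds = [i for i, c in enumerate(S) if c == '1']
--     if not odds or len(odds) % 2 == 1: return 'NO', []  # sum degree is even
--
--     # hook 0...1 to center
--     center = (odds[0] + 1) % N
--     edges = []
--     prev = '1'
--     for i in range(center+1, center+N):
--         i %= N
--         if prev == '1': edges.append((i+1, center+1))
--         else: edges.append((i+1, (i-1) % N + 1))
--         prev = S[i]
--
--     return 'YES', edges
-- ===== SOURCE B (Python) =====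
-- def solve(N, S):
--     odds = [i for i, c in enumerate(S) if c == '1']
--     if not odds or len(odds) % 2 == 1: return 'NO', []
--
--     center = (odds[0] + 1) % N
--     # non-center nodes in circular order; cut into consecutive segments,
--     # each segment ending right after a '1'-node
--     nodes = [(center + k) % N for k in range(1, N)]
--     segments, cur = [], []
--     for v in nodes:
--         cur.append(v)
--         if S[v] == '1':
--             segments.append(cur)
--             cur = []
--     if cur:
--         segments.append(cur)
--     # each segment: head hooks to center, the rest chain to their circular predecessor
--     edges = []
--     for seg in segments:
--         edges.append((seg[0] + 1, center + 1))
--         edges.extend((v + 1, (v - 1) % N + 1) for v in seg[1:])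
--     return 'YES', edges
-- ===== Notes on version B (the rewrite author's own statement) =====
-- stated objective: alternative
-- what changed: A's single pass with a prev-char flag choosing each edge's target is replaced by an explicit two-phase decomposition: cut the circular node order into segments ending after each '1'-node, then emit a center edge for each segment head and predecessor edges for the rest.
import Mathlib
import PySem

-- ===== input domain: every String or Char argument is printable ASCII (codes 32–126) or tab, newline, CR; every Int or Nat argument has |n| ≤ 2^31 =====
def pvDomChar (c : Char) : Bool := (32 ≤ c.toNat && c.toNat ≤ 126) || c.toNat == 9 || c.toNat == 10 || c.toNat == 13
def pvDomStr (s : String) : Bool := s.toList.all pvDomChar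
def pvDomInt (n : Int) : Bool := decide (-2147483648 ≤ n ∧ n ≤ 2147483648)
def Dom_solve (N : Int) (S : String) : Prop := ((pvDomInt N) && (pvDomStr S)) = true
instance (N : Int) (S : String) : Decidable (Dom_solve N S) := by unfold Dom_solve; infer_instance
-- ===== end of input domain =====

-- B replaces A's prev-flag loop by an explicit segment decomposition of the non-center
-- nodes (alternative decomposition, same cost, same return value).

-- ===== PORT A =====
def solve (N : Int) (S : String) : String × (List (Int × Int)) :=
  let odds := ((PySem.List.enumerate S.toList 0).filter (fun p => p.2 == '1')).map (fun p => p.1)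
  if odds = [] ∨ PySem.Int.mod (PySem.List.len odds) 2 = 1 then ("NO", [])
  else
    let center := PySem.Int.mod (PySem.List.pyGetD odds 0 0 + 1) N
    -- for i in range(center+1, center+N): i %= N; append …; prev = S[i]
    -- S[i] is ported as (pyGet? S i).getD '0'; the none case (IndexError) is outside Pre_solve
    let r := (PySem.List.pyRange (center + 1) (center + N) 1).foldl
      (fun (acc : List (Int × Int) × Char) i0 =>
        let i := PySem.Int.mod i0 N
        let edges := if acc.2 = '1' then acc.1 ++ [(i + 1, center + 1)]
                     else acc.1 ++ [(i + 1, PySem.Int.mod (i - 1) N + 1)]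
        (edges, (PySem.Str.pyGet? S i).getD '0'))
      ([], '1')
    ("YES", r.1)

-- ===== PORT B =====
def solve_alt (N : Int) (S : String) : String × (List (Int × Int)) :=
  let odds := ((PySem.List.enumerate S.toList 0).filter (fun p => p.2 == '1')).map (fun p => p.1)
  if odds = [] ∨ PySem.Int.mod (PySem.List.len odds) 2 = 1 then ("NO", [])
  else
    let center := PySem.Int.mod (PySem.List.pyGetD odds 0 0 + 1) N
    -- nodes = [(center+k) % N for k in range(1, N)]
    let nodes := (PySem.List.pyRange 1 N 1).map (fun k => PySem.Int.mod (center + k) N)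
    -- cut nodes into consecutive segments, each ending right after a '1'-node
    let sc := nodes.foldl
      (fun (acc : List (List Int) × List Int) v =>
        let cur := acc.2 ++ [v]
        if (PySem.Str.pyGet? S v).getD '0' = '1' then (acc.1 ++ [cur], ([] : List Int))
        else (acc.1, cur))
      ([], [])
    let segments := if sc.2 = [] then sc.1 else sc.1 ++ [sc.2]
    -- each segment: head hooks to center, the rest chain to their circular predecessor
    let edges := segments.foldl
      (fun es seg =>
        (es ++ [(PySem.List.pyGetD seg 0 0 + 1, center + 1)]) ++
          (PySem.List.slice seg (some 1) none).map (fun v => (v + 1, PySem.Int.mod (v - 1) N + 1)))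
      []
    ("YES", edges)

-- ===== PRECONDITION & SPEC =====
-- Pre_solve excludes exactly the inputs where Python A raises: N = 0 reaching '% N'
-- (ZeroDivisionError) and 2 ≤ N with N > len(S) so the loop reads S out of range (IndexError).
def Pre_solve (N : Int) (S : String) : Prop :=
  (S.toList.count '1' = 0 ∨ S.toList.count '1' % 2 = 1) ∨
    (N ≠ 0 ∧ (N ≤ 1 ∨ N ≤ (S.toList.length : Int)))
instance (N : Int) (S : String) : Decidable (Pre_solve N S) := by unfold Pre_solve; infer_instance
def pvWitness_solve : Int × String := (4, "0101")

def Spec_solve (N : Int) (S : String) (out : String × (List (Int × Int))) : Prop := out = solve_alt N S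
instance (N : Int) (S : String) (out : String × (List (Int × Int))) : Decidable (Spec_solve N S out) := by unfold Spec_solve; infer_instance

-- ===== CLAIM (what is proved, stated in full; the proofs are below) =====
def Claim_equal_solve : Prop := ∀ (N : Int) (S : String), Dom_solve N S → Pre_solve N S → Spec_solve N S (solve N S)

-- ===== LEMMAS AND PROOFS =====

-- the edge list both programs produce, read off directly: flag = "previous char was '1'"
def pvChain (N : Int) (S : String) (center : Int) : Bool → List Int → List (Int × Int)
  | _, [] => []
  | flag, v :: t =>
    (if flag then (v + 1, center + 1) else (v + 1, PySem.Int.mod (v - 1) N + 1)) ::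
      pvChain N S center (decide ((PySem.Str.pyGet? S v).getD '0' = '1')) t

-- edges B emits for one finished segment
def pvSeg (N : Int) (center : Int) (seg : List Int) : List (Int × Int) :=
  [(PySem.List.pyGetD seg 0 0 + 1, center + 1)] ++
    (PySem.List.slice seg (some 1) none).map (fun v => (v + 1, PySem.Int.mod (v - 1) N + 1))

-- edges still owed for the open segment cur followed by the remaining nodes ns
def pvPend (N : Int) (S : String) (center : Int) : List Int → List Int → List (Int × Int)
  | [], ns => pvChain N S center true ns
  | h :: t, ns =>
    ((h + 1, center + 1) :: t.map (fun v => (v + 1, PySem.Int.mod (v - 1) N + 1))) ++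
      pvChain N S center false ns

theorem pvSeg_cons (N center : Int) (h : Int) (t : List Int) :
    pvSeg N center (h :: t) =
      (h + 1, center + 1) :: t.map (fun v => (v + 1, PySem.Int.mod (v - 1) N + 1)) := by
  simp [pvSeg, PySem.List.pyGetD_zero_cons, PySem.List.slice_from_one]

theorem pvChain_nil (N : Int) (S : String) (center : Int) (f : Bool) :
    pvChain N S center f [] = [] := rfl

theorem pvChain_cons (N : Int) (S : String) (center : Int) (f : Bool) (v : Int) (t : List Int) :
    pvChain N S center f (v :: t) =
      (if f then (v + 1, center + 1) else (v + 1, PySem.Int.mod (v - 1) N + 1)) ::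
        pvChain N S center (decide ((PySem.Str.pyGet? S v).getD '0' = '1')) t := rfl

theorem pvA_foldl (N : Int) (S : String) (center : Int) (ns : List Int)
    (es : List (Int × Int)) (prev : Char) :
    (ns.foldl
      (fun (acc : List (Int × Int) × Char) i =>
        let edges := if acc.2 = '1' then acc.1 ++ [(i + 1, center + 1)]
                     else acc.1 ++ [(i + 1, PySem.Int.mod (i - 1) N + 1)]
        (edges, (PySem.Str.pyGet? S i).getD '0'))
      (es, prev)).1 = es ++ pvChain N S center (decide (prev = '1')) ns := by
  induction ns generalizing es prev with
  | nil => simp [pvChain_nil]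
  | cons v t ih =>
    simp only [List.foldl_cons]
    by_cases hp : prev = '1'
    · simp only [hp]
      rw [ih]; simp [pvChain_cons, List.append_assoc]
    · simp only [if_neg hp]
      rw [ih]; simp [pvChain_cons, hp, List.append_assoc]

theorem pvB_foldl (N : Int) (S : String) (center : Int) (ns : List Int)
    (segs : List (List Int)) (cur : List Int) :
    (let sc := ns.foldl
        (fun (acc : List (List Int) × List Int) v =>
          let cur := acc.2 ++ [v]
          if (PySem.Str.pyGet? S v).getD '0' = '1' then (acc.1 ++ [cur], ([] : List Int))
          else (acc.1, cur))
        (segs, cur)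
      let segments := if sc.2 = [] then sc.1 else sc.1 ++ [sc.2]
      segments.flatMap (pvSeg N center)) =
      segs.flatMap (pvSeg N center) ++ pvPend N S center cur ns := by
  induction ns generalizing segs cur with
  | nil =>
    cases cur with
    | nil => simp [pvPend, pvChain]
    | cons h t => simp [pvPend, pvSeg_cons, pvChain_nil]
  | cons v t ih =>
    by_cases hv : (PySem.Str.pyGet? S v).getD '0' = '1'
    · have hv' : (PySem.List.pyGet? S.toList v).getD '0' = '1' := by simpa using hv
      simp only [List.foldl_cons, hv, ih]
      cases cur with
      | nil => simp [pvPend, pvSeg_cons, pvChain_cons, hv']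
      | cons h tl => simp [pvPend, pvSeg_cons, pvChain_cons, hv', List.append_assoc]
    · have hv' : ¬ (PySem.List.pyGet? S.toList v).getD '0' = '1' := by simpa using hv
      simp only [List.foldl_cons, hv, ih]
      cases cur with
      | nil => simp [pvPend, pvChain_cons, hv']
      | cons h tl => simp [pvPend, pvChain_cons, hv', List.append_assoc]

-- B's edge-emitting foldl is flatMap of pvSeg
theorem pvB_edges (N center : Int) (segs : List (List Int)) :
    segs.foldl
      (fun es seg =>
        (es ++ [(PySem.List.pyGetD seg 0 0 + 1, center + 1)]) ++
          (PySem.List.slice seg (some 1) none).map (fun v => (v + 1, PySem.Int.mod (v - 1) N + 1)))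
      [] = segs.flatMap (pvSeg N center) := by
  have hf : (fun (es : List (Int × Int)) (seg : List Int) =>
      (es ++ [(PySem.List.pyGetD seg 0 0 + 1, center + 1)]) ++
        (PySem.List.slice seg (some 1) none).map (fun v => (v + 1, PySem.Int.mod (v - 1) N + 1))) =
      (fun es seg => es ++ pvSeg N center seg) := by
    funext es seg; simp [pvSeg]
  rw [hf, PySem.List.foldl_append_eq_flatMap, List.nil_append]

-- A's traversal list, reduced mod N, is B's nodes list
theorem pvRange_map (N center : Int) :
    (PySem.List.pyRange (center + 1) (center + N) 1).map (fun i0 => PySem.Int.mod i0 N) =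
      ((PySem.List.pyRange 1 N 1).map (fun k => PySem.Int.mod (center + k) N)) := by
  rw [PySem.List.pyRange_one, PySem.List.pyRange_one]
  simp only [List.map_map]
  have : center + N - (center + 1) = N - 1 := by ring
  rw [this]
  apply List.map_congr_left
  intro k _
  simp only [Function.comp]
  congr 1
  ring

-- ===== VERDICT (by name: the statement is the Claim_ definition above) =====
theorem solve_spec : Claim_equal_solve := by
  intro N S _ _
  unfold Spec_solve solve solve_alt
  by_cases hg : ((PySem.List.enumerate S.toList 0).filter (fun p => p.2 == '1')).map (fun p => p.1) = [] ∨
      PySem.Int.mod (PySem.List.len (((PySem.List.enumerate S.toList 0).filter (fun p => p.2 == '1')).map (fun p => p.1))) 2 = 1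
  · simp only [if_pos hg]
  · simp only [if_neg hg]
    refine Prod.ext rfl ?_
    simp only
    set center := PySem.Int.mod
      (PySem.List.pyGetD (((PySem.List.enumerate S.toList 0).filter (fun p => p.2 == '1')).map (fun p => p.1)) 0 0 + 1) N with hc
    rw [pvB_edges]
    have hB := pvB_foldl N S center
      ((PySem.List.pyRange 1 N 1).map (fun k => PySem.Int.mod (center + k) N)) [] []
    simp only [List.flatMap_nil, List.nil_append] at hB
    rw [hB]
    have hA : (PySem.List.pyRange (center + 1) (center + N) 1).foldl
        (fun (acc : List (Int × Int) × Char) i0 =>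
          let i := PySem.Int.mod i0 N
          let edges := if acc.2 = '1' then acc.1 ++ [(i + 1, center + 1)]
                       else acc.1 ++ [(i + 1, PySem.Int.mod (i - 1) N + 1)]
          (edges, (PySem.Str.pyGet? S i).getD '0'))
        ([], '1') =
        ((PySem.List.pyRange (center + 1) (center + N) 1).map (fun i0 => PySem.Int.mod i0 N)).foldl
        (fun (acc : List (Int × Int) × Char) i =>
          let edges := if acc.2 = '1' then acc.1 ++ [(i + 1, center + 1)]
                       else acc.1 ++ [(i + 1, PySem.Int.mod (i - 1) N + 1)]
          (edges, (PySem.Str.pyGet? S i).getD '0'))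
        ([], '1') := by
      rw [List.foldl_map]
    rw [hA, pvRange_map]
    rw [pvA_foldl]
    simp [pvPend]
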